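-- pv_equiv track=rewrite | github.com/FrivolousFelka/Roblox_Scripts | Lua Obfuscation/Sage.py | obfuscate_lua
-- ===== SOURCE A (Python) =====
-- def obfuscate_lua(lua_code):
--     obfuscated_code = []
--     for line in lua_code.split('\n'):
--         for char in line:
--             obfuscated_code.append(str(ord(char)))
--         obfuscated_code.append('10')  # ASCII code for newline character
--     obfuscated_str = 'string.char(' + ','.join(obfuscated_code) + ')'
--     return obfuscated_str
-- ===== SOURCE B (Python) =====
-- def obfuscate_lua(lua_code):
--     # Build the result string directly in one forward pass, appending "<code>,"
--     # per character and closing with the trailing newline code; no split, no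
--     # intermediate list, no join.
--     res = 'string.char('
--     for c in lua_code:
--         res += str(ord(c)) + ','
--     return res + '10)'
-- ===== Notes on version B (the rewrite author's own statement) =====
-- stated objective: simpler
-- what changed: Replaces the line-splitting, the nested per-line loop, the intermediate list of code strings and the final join by one forward pass that appends each character's code and a comma directly to the output string, then closes with the newline terminator code and the bracket.
import Mathlib
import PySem

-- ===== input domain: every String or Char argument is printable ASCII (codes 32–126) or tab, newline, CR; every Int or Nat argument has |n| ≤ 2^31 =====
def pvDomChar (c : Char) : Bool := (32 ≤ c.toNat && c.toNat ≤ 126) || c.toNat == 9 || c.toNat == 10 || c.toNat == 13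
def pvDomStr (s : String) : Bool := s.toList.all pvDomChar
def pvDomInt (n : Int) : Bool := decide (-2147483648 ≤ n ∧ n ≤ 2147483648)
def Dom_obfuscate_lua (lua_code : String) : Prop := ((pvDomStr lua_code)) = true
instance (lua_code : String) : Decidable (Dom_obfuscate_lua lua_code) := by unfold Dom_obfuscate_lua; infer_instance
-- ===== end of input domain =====

-- B drops the split('\n'), the nested loop, the intermediate list and the join for one
-- forward pass appending "<code>," per character directly to the output string
-- (objective: simpler); return values proved equal on Dom.

-- ===== PORT A =====
-- str(ord(char))
def pvOrdStrA (c : Char) : String := PySem.Int.toStr (c.toNat : Int)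

def obfuscate_lua (lua_code : String) : String :=
  let obfuscated_code : List String :=
    (PySem.Chars.splitOn lua_code.toList ['\n']).foldl
      (fun acc line =>
        (line.foldl (fun acc2 c => acc2 ++ [pvOrdStrA c]) acc) ++ ["10"])
      []
  "string.char(" ++ PySem.Str.join "," obfuscated_code ++ ")"

-- ===== PORT B =====
def obfuscate_lua_alt (lua_code : String) : String :=
  let res : String :=
    lua_code.toList.foldl
      (fun res c => res ++ PySem.Int.toStr (c.toNat : Int) ++ ",") "string.char("
  res ++ "10)"

-- ===== PRECONDITION & SPEC =====
def Spec_obfuscate_lua (lua_code : String) (out : String) : Prop := out = obfuscate_lua_alt lua_code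
instance (lua_code : String) (out : String) : Decidable (Spec_obfuscate_lua lua_code out) := by unfold Spec_obfuscate_lua; infer_instance

-- ===== CLAIM =====
def Claim_equal_obfuscate_lua : Prop := ∀ (lua_code : String), Dom_obfuscate_lua lua_code → Spec_obfuscate_lua lua_code (obfuscate_lua lua_code)

-- ===== LEMMAS AND PROOFS =====

-- structural recursion computing split('\n')
def pvSplitNL : List Char → List (List Char)
  | [] => [[]]
  | c :: rest =>
      if c = '\n' then [] :: pvSplitNL rest
      else (pvSplitNL rest).modifyHead (fun t => c :: t)

theorem pvSplitNL_ne_nil (cs : List Char) : pvSplitNL cs ≠ [] := by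
  induction cs with
  | nil => simp [pvSplitNL]
  | cons c rest ih =>
      simp only [pvSplitNL]
      split_ifs
      · simp
      · cases h : pvSplitNL rest with
        | nil => exact absurd h ih
        | cons hd tl => simp

theorem pv_go_inv (fuel : Nat) :
    ∀ (l cur : List Char) (acc : List (List Char)), l.length < fuel →
      PySem.Chars.splitOn.go ['\n'] fuel l cur acc
        = acc.reverse ++ (pvSplitNL l).modifyHead (fun t => cur.reverse ++ t) := by
  induction fuel with
  | zero => intro l cur acc h; omega
  | succ n ih =>
      intro l cur acc h
      cases l with
      | nil => simp [PySem.Chars.splitOn.go, pvSplitNL]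
      | cons c rest =>
          by_cases hc : c = '\n'
          · subst hc
            have hpre : List.isPrefixOf ['\n'] ('\n' :: rest) = true := by
              simp [List.isPrefixOf]
            simp only [PySem.Chars.splitOn.go, hpre, if_pos, List.length_cons,
              List.length_nil, Nat.zero_add, List.drop_succ_cons, List.drop_zero] at *
            rw [ih rest [] (List.reverse cur :: acc) (by omega)]
            cases hs : pvSplitNL rest <;> simp [pvSplitNL, hs]
          · have hpre : List.isPrefixOf ['\n'] (c :: rest) = false := by
              simp [List.isPrefixOf]
              exact fun h => absurd h.symm hc
            simp only [PySem.Chars.splitOn.go, hpre, Bool.false_eq_true, if_false] at *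
            rw [ih rest (c :: cur) acc (by simp at h; omega)]
            simp only [pvSplitNL, hc, if_false]
            cases hs : pvSplitNL rest with
            | nil => simp
            | cons hd tl => simp

theorem pv_splitOn_eq (cs : List Char) :
    PySem.Chars.splitOn cs ['\n'] = pvSplitNL cs := by
  unfold PySem.Chars.splitOn
  rw [pv_go_inv (cs.length + 1) cs [] [] (by omega)]
  cases h : pvSplitNL cs with
  | nil => exact absurd h (pvSplitNL_ne_nil cs)
  | cons hd tl => simp

theorem pv_inner_foldl (l : List Char) (acc : List String) :
    l.foldl (fun a c => a ++ [pvOrdStrA c]) acc = acc ++ l.map pvOrdStrA := by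
  induction l generalizing acc with
  | nil => simp
  | cons c rest ih => simp [List.foldl_cons, ih]

theorem pv_ordStr_nl : pvOrdStrA '\n' = "10" := by decide

theorem pv_outer_foldl (cs : List Char) (acc : List String) :
    (pvSplitNL cs).foldl
        (fun acc line => (line.foldl (fun a c => a ++ [pvOrdStrA c]) acc) ++ ["10"]) acc
      = acc ++ cs.map pvOrdStrA ++ ["10"] := by
  induction cs generalizing acc with
  | nil => simp [pvSplitNL]
  | cons c rest ih =>
      by_cases hc : c = '\n'
      · subst hc
        rw [show pvSplitNL ('\n' :: rest) = [] :: pvSplitNL rest from by simp [pvSplitNL]]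
        simp only [List.foldl_cons, List.foldl_nil]
        rw [ih]
        simp [pv_ordStr_nl]
      · simp only [pvSplitNL, hc, if_false]
        cases hs : pvSplitNL rest with
        | nil => exact absurd hs (pvSplitNL_ne_nil rest)
        | cons hd tl =>
            have ih' := ih (acc ++ [pvOrdStrA c])
            rw [hs] at ih'
            simp only [List.modifyHead_cons, List.foldl_cons, pv_inner_foldl] at ih' ⊢
            rw [show (acc ++ List.map pvOrdStrA (c :: hd) ++ ["10"])
                  = (acc ++ [pvOrdStrA c] ++ List.map pvOrdStrA hd ++ ["10"]) from by simp]
            rw [ih']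
            simp

-- the comma-terminated code list both sides produce, as characters
def pvCodesL : List Char → List Char
  | [] => []
  | c :: rest => (pvOrdStrA c).toList ++ [','] ++ pvCodesL rest

theorem pv_foldB (cs : List Char) (s : String) :
    (cs.foldl (fun res c => res ++ PySem.Int.toStr (c.toNat : Int) ++ ",") s).toList
      = s.toList ++ pvCodesL cs := by
  induction cs generalizing s with
  | nil => simp [pvCodesL]
  | cons c rest ih =>
      simp only [List.foldl_cons, ih, pvCodesL, pvOrdStrA]
      simp

theorem pv_joinA (cs : List Char) :
    List.intercalate [','] (cs.map (String.toList ∘ pvOrdStrA) ++ [['1', '0']])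
      = pvCodesL cs ++ ['1', '0'] := by
  induction cs with
  | nil => simp [List.intercalate, pvCodesL]
  | cons c rest ih =>
      cases rest with
      | nil =>
          simp [List.intercalate, List.intersperse, pvCodesL]
      | cons d ds =>
          simp only [List.map_cons, List.cons_append] at ih ⊢
          rw [show ∀ (x y : List Char) (l : List (List Char)),
                List.intercalate [','] (x :: y :: l)
                  = x ++ [','] ++ List.intercalate [','] (y :: l)
              from fun x y l => by simp [List.intercalate, List.intersperse]]
          rw [ih]
          simp [pvCodesL]

-- ===== VERDICT =====
theorem obfuscate_lua_spec : Claim_equal_obfuscate_lua := by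
  intro lua_code _
  unfold Spec_obfuscate_lua obfuscate_lua obfuscate_lua_alt
  rw [pv_splitOn_eq, pv_outer_foldl]
  apply String.toList_injective
  simp only [String.toList_append, pv_foldB]
  simp only [PySem.Str.join, PySem.Chars.join, List.nil_append]
  rw [show (List.map pvOrdStrA lua_code.toList ++ ["10"]).map String.toList
        = lua_code.toList.map (String.toList ∘ pvOrdStrA) ++ [['1', '0']] from by
      simp [List.map_map]]
  simp only [String.toList_ofList, show (",").toList = [','] from rfl]
  rw [pv_joinA]
  simp
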